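-- pv_equiv track=rewrite | github.com/Surelinks/ATLAS | ui/app.py | filter_incidents
-- ===== SOURCE A (Python) =====
-- from typing import Dict, List, Optional
--
-- def filter_incidents(incidents: List[Dict], search: str, severity: str) -> List[Dict]:
--     """Filter incidents by search query and severity"""
--     filtered = incidents
--
--     if search:
--         search_lower = search.lower()
--         filtered = [
--             inc for inc in filtered
--             if search_lower in inc.get('description', '').lower() or
--                search_lower in inc.get('asset_id', '').lower()
--         ]
--
--     if severity != "All":
--         filtered = [inc for inc in filtered if inc.get('severity', '').lower() == severity.lower()]
--
--     return filtered
-- ===== SOURCE B (Python) =====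
-- def filter_incidents(incidents, search, severity):
--     """Filter incidents: bucket by lowercased severity once, pick the matching
--     bucket, then apply the search filter to that (usually much smaller) pool."""
--     if severity != "All":
--         buckets = {}
--         for inc in incidents:
--             buckets.setdefault(inc.get('severity', '').lower(), []).append(inc)
--         pool = buckets.get(severity.lower(), [])
--     else:
--         pool = list(incidents)
--     if not search:
--         return pool
--     needle = search.lower()
--     return [inc for inc in pool
--             if needle in inc.get('description', '').lower()
--             or needle in inc.get('asset_id', '').lower()]
-- ===== Notes on version B (the rewrite author's own statement) =====
-- stated objective: alternative
-- what changed: Instead of two chained filter comprehensions (search first, then severity), B builds a dict index grouping incidents by lowercased severity in one pass, selects the matching bucket by a single lookup (or the whole list for 'All'), and only then applies the search test to that pool; correctness rests on the two filters commuting.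
import Mathlib
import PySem

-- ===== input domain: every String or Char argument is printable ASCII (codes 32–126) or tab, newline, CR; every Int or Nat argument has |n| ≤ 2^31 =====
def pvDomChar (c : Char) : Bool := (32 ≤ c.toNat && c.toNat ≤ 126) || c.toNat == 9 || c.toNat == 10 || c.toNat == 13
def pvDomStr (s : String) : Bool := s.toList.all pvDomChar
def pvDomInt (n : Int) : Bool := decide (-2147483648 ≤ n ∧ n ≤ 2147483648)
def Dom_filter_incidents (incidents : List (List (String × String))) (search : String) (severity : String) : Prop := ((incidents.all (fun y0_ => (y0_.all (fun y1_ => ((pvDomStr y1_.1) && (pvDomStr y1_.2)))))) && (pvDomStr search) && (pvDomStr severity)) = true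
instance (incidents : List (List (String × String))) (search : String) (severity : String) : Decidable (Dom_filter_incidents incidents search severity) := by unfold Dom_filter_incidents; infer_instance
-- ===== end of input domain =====

-- B replaces A's two chained filter comprehensions with a dict index grouping incidents by
-- lowercased severity (one pass), a single bucket lookup, then the search test on that pool
-- (objective: alternative decomposition, same cost).

-- ===== PORT A =====
def filter_incidents (incidents : List (List (String × String))) (search : String) (severity : String) : List (List (String × String)) :=
  let filtered := incidents
  let filtered :=
    if search ≠ "" then
      let search_lower := PySem.Str.lower search
      filtered.filter (fun inc =>
        PySem.Str.isIn search_lower (PySem.Str.lower ((PySem.Dict.mk inc).getD "description" "")) ||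
        PySem.Str.isIn search_lower (PySem.Str.lower ((PySem.Dict.mk inc).getD "asset_id" "")))
    else filtered
  let filtered :=
    if severity ≠ "All" then
      filtered.filter (fun inc =>
        PySem.Str.lower ((PySem.Dict.mk inc).getD "severity" "") == PySem.Str.lower severity)
    else filtered
  filtered

-- ===== PORT B =====
def filter_incidents_alt (incidents : List (List (String × String))) (search : String) (severity : String) : List (List (String × String)) :=
  let pool :=
    if severity ≠ "All" then
      -- buckets: dict keyed by lowercased severity; setdefault(..., []).append(inc) = modify key [] (· ++ [inc])
      let buckets := incidents.foldl
        (fun d inc => d.modify (PySem.Str.lower ((PySem.Dict.mk inc).getD "severity" "")) [] (· ++ [inc]))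
        PySem.Dict.empty
      buckets.getD (PySem.Str.lower severity) []
    else incidents
  if search = "" then pool
  else
    let needle := PySem.Str.lower search
    pool.filter (fun inc =>
      PySem.Str.isIn needle (PySem.Str.lower ((PySem.Dict.mk inc).getD "description" "")) ||
      PySem.Str.isIn needle (PySem.Str.lower ((PySem.Dict.mk inc).getD "asset_id" "")))

-- ===== PRECONDITION & SPEC =====
def Spec_filter_incidents (incidents : List (List (String × String))) (search : String) (severity : String) (out : List (List (String × String))) : Prop := out = filter_incidents_alt incidents search severity
instance (incidents : List (List (String × String))) (search : String) (severity : String) (out : List (List (String × String))) : Decidable (Spec_filter_incidents incidents search severity out) := by unfold Spec_filter_incidents; infer_instance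

-- ===== CLAIM =====
def Claim_equal_filter_incidents : Prop := ∀ (incidents : List (List (String × String))) (search : String) (severity : String), Dom_filter_incidents incidents search severity → Spec_filter_incidents incidents search severity (filter_incidents incidents search severity)

-- ===== LEMMAS AND PROOFS =====

-- the bucket of key c in the grouping fold is exactly the in-order filter by key
theorem getD_group_fold {α : Type} (l : List α) (key : α → String)
    (d : PySem.Dict String (List α)) (c : String) :
    (l.foldl (fun d x => d.modify (key x) [] (· ++ [x])) d).getD c [] =
      d.getD c [] ++ l.filter (fun x => key x == c) := by
  induction l generalizing d with
  | nil => simp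
  | cons x xs ih =>
    simp only [List.foldl_cons, List.filter_cons, ih]
    rw [PySem.Dict.getD_modify]
    by_cases h : c = key x
    · simp [h]
    · have : (key x == c) = false := by simp [Ne.symm h]
      simp [h, this]

-- ===== VERDICT =====
theorem filter_incidents_spec : Claim_equal_filter_incidents := by
  intro incidents search severity _
  unfold Spec_filter_incidents filter_incidents filter_incidents_alt
  by_cases hv : severity = "All" <;> by_cases hs : search = "" <;>
    simp only [hv, hs, ne_eq, not_true_eq_false, not_false_eq_true, if_true, if_false]
  · rw [getD_group_fold, PySem.Dict.getD_empty, List.nil_append]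
  · rw [getD_group_fold, PySem.Dict.getD_empty, List.nil_append,
      List.filter_filter, List.filter_filter]
    exact List.filter_congr (fun inc _ => Bool.and_comm _ _)
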